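-- pv_equiv track=rewrite | github.com/sscott97/NTAWeb | app.py | pm_build_grid
-- ===== SOURCE A (Python) =====
-- def pm_build_grid(sample_ids, replicate_count, layout_mode,
--                   pos_label='PosCtrl', neg_label='NegCtrl', ctrl3_label='Ctrl3',
--                   include_pos=True, include_neg=True, include_ctrl3=True):
--     grid = [["" for _ in range(12)] for _ in range(8)]
--     if layout_mode == 'vertical':
--         fill_positions = []
--         control_labels = []
--         if include_pos:
--             control_labels += [pos_label] * replicate_count
--         if include_neg:
--             control_labels += [neg_label] * replicate_count
--         if include_ctrl3:
--             control_labels += [ctrl3_label] * replicate_count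
--         control_col = 0
--         control_row = 0
--         for label in control_labels:
--             if control_row >= 8:
--                 control_row = 0
--                 control_col += 1
--                 if control_col >= 12:
--                     break
--             grid[control_row][control_col] = label
--             control_row += 1
--         for col in range(12):
--             for row in range(8):
--                 if grid[row][col] == "":
--                     fill_positions.append((row, col))
--         idx = 0
--         for sid in sample_ids:
--             for _ in range(replicate_count):
--                 if idx >= len(fill_positions):
--                     break
--                 r, c = fill_positions[idx]
--                 grid[r][c] = sid
--                 idx += 1
--     elif layout_mode == 'horizontal':
--         current_row = 0
--         col = 0
--         if include_pos:
--             for rep in range(replicate_count):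
--                 grid[current_row][col + rep] = pos_label
--             current_row += 1
--         if include_neg:
--             for rep in range(replicate_count):
--                 grid[current_row][col + rep] = neg_label
--             current_row += 1
--         if include_ctrl3:
--             for rep in range(replicate_count):
--                 grid[current_row][col + rep] = ctrl3_label
--             current_row += 1
--         sample_idx = 0
--         while sample_idx < len(sample_ids):
--             if current_row >= 8:
--                 current_row = 0
--                 col += replicate_count
--                 if col + replicate_count > 12:
--                     break
--             for rep in range(replicate_count):
--                 if col + rep < 12:
--                     grid[current_row][col + rep] = sample_ids[sample_idx]
--             current_row += 1
--             sample_idx += 1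
--     return grid
-- ===== SOURCE B (Python) =====
-- def _fill_horizontal(grid, sample_ids, replicate_count,
--                      pos_label, neg_label, ctrl3_label,
--                      include_pos, include_neg, include_ctrl3):
--     current_row = 0
--     col = 0
--     if include_pos:
--         for rep in range(replicate_count):
--             grid[current_row][col + rep] = pos_label
--         current_row += 1
--     if include_neg:
--         for rep in range(replicate_count):
--             grid[current_row][col + rep] = neg_label
--         current_row += 1
--     if include_ctrl3:
--         for rep in range(replicate_count):
--             grid[current_row][col + rep] = ctrl3_label
--         current_row += 1
--     sample_idx = 0
--     while sample_idx < len(sample_ids):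
--         if current_row >= 8:
--             current_row = 0
--             col += replicate_count
--             if col + replicate_count > 12:
--                 break
--         for rep in range(replicate_count):
--             if col + rep < 12:
--                 grid[current_row][col + rep] = sample_ids[sample_idx]
--         current_row += 1
--         sample_idx += 1
--
--
-- def pm_build_grid(sample_ids, replicate_count, layout_mode,
--                   pos_label='PosCtrl', neg_label='NegCtrl', ctrl3_label='Ctrl3',
--                   include_pos=True, include_neg=True, include_ctrl3=True):
--     grid = [["" for _ in range(12)] for _ in range(8)]
--     if layout_mode == 'vertical':
--         # one flat column-major fill: control labels first, then samples,
--         # capped at the plate's 96 wells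
--         labels = []
--         if include_pos:
--             labels += [pos_label] * replicate_count
--         if include_neg:
--             labels += [neg_label] * replicate_count
--         if include_ctrl3:
--             labels += [ctrl3_label] * replicate_count
--         labels = labels[:96]
--         for sid in sample_ids:
--             if len(labels) >= 96:
--                 break
--             labels += [sid] * min(replicate_count, 96 - len(labels))
--         for k, lab in enumerate(labels):
--             grid[k % 8][k // 8] = lab
--     elif layout_mode == 'horizontal':
--         _fill_horizontal(grid, sample_ids, replicate_count,
--                          pos_label, neg_label, ctrl3_label,
--                          include_pos, include_neg, include_ctrl3)
--     return grid
-- ===== Notes on version B (the rewrite author's own statement) =====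
-- stated objective: simpler
-- what changed: The vertical branch's three phases (cursor-driven control placement, scan for empty wells, indexed sample fill) are replaced by building one flat label list (controls then replicated samples, capped at 96) and writing it into the plate in a single column-major fill; the horizontal branch's loop structure is kept intact (factored into a helper).
import Mathlib
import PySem

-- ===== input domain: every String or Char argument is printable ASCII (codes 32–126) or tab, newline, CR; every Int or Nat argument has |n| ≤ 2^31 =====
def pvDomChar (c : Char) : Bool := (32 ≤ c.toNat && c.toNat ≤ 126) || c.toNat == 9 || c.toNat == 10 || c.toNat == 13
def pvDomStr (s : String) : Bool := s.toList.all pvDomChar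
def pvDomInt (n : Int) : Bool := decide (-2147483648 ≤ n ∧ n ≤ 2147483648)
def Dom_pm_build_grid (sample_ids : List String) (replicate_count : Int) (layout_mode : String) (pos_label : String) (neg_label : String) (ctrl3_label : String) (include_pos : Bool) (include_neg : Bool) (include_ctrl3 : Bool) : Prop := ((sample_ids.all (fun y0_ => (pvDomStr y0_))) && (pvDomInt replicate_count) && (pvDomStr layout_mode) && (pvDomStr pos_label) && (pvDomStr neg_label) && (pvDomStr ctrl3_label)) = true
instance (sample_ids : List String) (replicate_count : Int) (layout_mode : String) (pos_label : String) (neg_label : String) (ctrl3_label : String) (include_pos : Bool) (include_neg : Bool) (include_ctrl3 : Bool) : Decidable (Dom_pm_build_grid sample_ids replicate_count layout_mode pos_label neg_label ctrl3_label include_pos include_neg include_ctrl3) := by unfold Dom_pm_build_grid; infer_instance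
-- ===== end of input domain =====

-- B replaces A's three-phase vertical fill (cursor placement, empty-well scan, indexed
-- sample fill) by one flat column-major fill of a label list capped at 96; the horizontal
-- branch keeps A's loop structure (factored into a helper).  Objective: simpler.

-- shared low-level helpers: the 8x12 plate and a single well write (grid[r][c] = v)
def pvGrid0 : List (List String) := List.replicate 8 (List.replicate 12 "")

def pvSetCell (g : List (List String)) (r c : Nat) (v : String) : List (List String) :=
  g.modify r (fun row => row.set c v)

-- write with a possibly negative column (no-op there; under Pre_ every Python write is in range)
def pvSetCellI (g : List (List String)) (r : Nat) (c : Int) (v : String) : List (List String) :=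
  if 0 ≤ c then pvSetCell g r c.toNat v else g

-- the horizontal while-loop, identical in A and in B's helper (B's Python reuses A's loop text)
def pmHWhile (rep : Int) : List String → List (List String) → Nat → Int → List (List String)
  | [], g, _, _ => g
  | sid :: rest, g, crow, col =>
    let st : Nat × Int × Bool :=
      if crow ≥ 8 then (0, col + rep, decide (col + rep + rep > 12)) else (crow, col, false)
    if st.2.2 then g
    else
      let g := (List.range rep.toNat).foldl
        (fun g ri => if st.2.1 + (ri : Int) < 12 then pvSetCellI g st.1 (st.2.1 + (ri : Int)) sid else g) g
      pmHWhile rep rest g (st.1 + 1) st.2.1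

-- ===== PORT A =====
-- vertical control-placement loop (cursor + break)
def pmCtrlLoop : List String → List (List String) → Nat → Nat → List (List String)
  | [], g, _, _ => g
  | label :: rest, g, crow, ccol =>
    if crow ≥ 8 then
      if ccol + 1 ≥ 12 then g
      else pmCtrlLoop rest (pvSetCell g 0 (ccol + 1) label) 1 (ccol + 1)
    else pmCtrlLoop rest (pvSetCell g crow ccol label) (crow + 1) ccol

def pvCell (g : List (List String)) (r c : Nat) : String := (g.getD r []).getD c ""

-- column-major scan for empty wells
def pmFillPositions (g : List (List String)) : List (Nat × Nat) :=
  (List.range 12).foldl (fun acc col =>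
    (List.range 8).foldl (fun acc row =>
      if pvCell g row col == "" then acc ++ [(row, col)] else acc) acc) []

-- inner 'for _ in range(replicate_count)' with the idx-bound break
def pmInnerFill (sid : String) (fp : List (Nat × Nat)) :
    Nat → List (List String) × Nat → List (List String) × Nat
  | 0, st => st
  | n + 1, (g, idx) =>
    if idx ≥ fp.length then (g, idx)
    else
      let rc := fp.getD idx (0, 0)
      pmInnerFill sid fp n (pvSetCell g rc.1 rc.2 sid, idx + 1)

def pm_build_grid (sample_ids : List String) (replicate_count : Int) (layout_mode : String) (pos_label : String) (neg_label : String) (ctrl3_label : String) (include_pos : Bool) (include_neg : Bool) (include_ctrl3 : Bool) : List (List String) :=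
  let grid := pvGrid0
  if layout_mode = "vertical" then
    let control_labels : List String :=
      (if include_pos then List.replicate replicate_count.toNat pos_label else []) ++
      (if include_neg then List.replicate replicate_count.toNat neg_label else []) ++
      (if include_ctrl3 then List.replicate replicate_count.toNat ctrl3_label else [])
    let grid := pmCtrlLoop control_labels grid 0 0
    let fp := pmFillPositions grid
    (sample_ids.foldl (fun st sid => pmInnerFill sid fp replicate_count.toNat st) (grid, 0)).1
  else if layout_mode = "horizontal" then
    let crow : Nat := 0
    let col : Int := 0
    let st1 := if include_pos then
        ((List.range replicate_count.toNat).foldl (fun g ri => pvSetCellI g crow (col + (ri : Int)) pos_label) grid, crow + 1)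
      else (grid, crow)
    let st2 := if include_neg then
        ((List.range replicate_count.toNat).foldl (fun g ri => pvSetCellI g st1.2 (col + (ri : Int)) neg_label) st1.1, st1.2 + 1)
      else st1
    let st3 := if include_ctrl3 then
        ((List.range replicate_count.toNat).foldl (fun g ri => pvSetCellI g st2.2 (col + (ri : Int)) ctrl3_label) st2.1, st2.2 + 1)
      else st2
    pmHWhile replicate_count sample_ids st3.1 st3.2 col
  else grid

-- ===== PORT B =====
-- B's helper _fill_horizontal: A's horizontal code, verbatim, behind a function
def pmFillHorizontal (grid : List (List String)) (sample_ids : List String) (replicate_count : Int) (pos_label neg_label ctrl3_label : String) (include_pos include_neg include_ctrl3 : Bool) : List (List String) :=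
  let crow : Nat := 0
  let col : Int := 0
  let st1 := if include_pos then
      ((List.range replicate_count.toNat).foldl (fun g ri => pvSetCellI g crow (col + (ri : Int)) pos_label) grid, crow + 1)
    else (grid, crow)
  let st2 := if include_neg then
      ((List.range replicate_count.toNat).foldl (fun g ri => pvSetCellI g st1.2 (col + (ri : Int)) neg_label) st1.1, st1.2 + 1)
    else st1
  let st3 := if include_ctrl3 then
      ((List.range replicate_count.toNat).foldl (fun g ri => pvSetCellI g st2.2 (col + (ri : Int)) ctrl3_label) st2.1, st2.2 + 1)
    else st2
  pmHWhile replicate_count sample_ids st3.1 st3.2 col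

-- 'for sid in sample_ids: if len(labels) >= 96: break; labels += [sid]*min(rep, 96-len)'
def pmFillLabels (rep : Int) : List String → List String → List String
  | [], labels => labels
  | sid :: rest, labels =>
    if labels.length ≥ 96 then labels
    else pmFillLabels rep rest (labels ++ List.replicate (min rep (96 - (labels.length : Int))).toNat sid)

-- 'for k, lab in enumerate(labels): grid[k % 8][k // 8] = lab'
def pmPlaceLabels (labels : List String) (g : List (List String)) : List (List String) :=
  (labels.zipIdx).foldl (fun g kl => pvSetCell g (kl.2 % 8) (kl.2 / 8) kl.1) g

def pm_build_grid_alt (sample_ids : List String) (replicate_count : Int) (layout_mode : String) (pos_label : String) (neg_label : String) (ctrl3_label : String) (include_pos : Bool) (include_neg : Bool) (include_ctrl3 : Bool) : List (List String) :=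
  let grid := pvGrid0
  if layout_mode = "vertical" then
    let labels : List String :=
      ((if include_pos then List.replicate replicate_count.toNat pos_label else []) ++
       (if include_neg then List.replicate replicate_count.toNat neg_label else []) ++
       (if include_ctrl3 then List.replicate replicate_count.toNat ctrl3_label else [])).take 96
    let labels := pmFillLabels replicate_count sample_ids labels
    pmPlaceLabels labels grid
  else if layout_mode = "horizontal" then
    pmFillHorizontal grid sample_ids replicate_count pos_label neg_label ctrl3_label include_pos include_neg include_ctrl3
  else grid

-- ===== PRECONDITION & SPEC =====
-- Pre_ excludes (a) horizontal layouts with replicate_count ≥ 13 and a control row included,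
-- where A raises IndexError on the unchecked control write, and (b) vertical layouts where an
-- included control label is the empty string (with samples present and replicate_count ≥ 1):
-- there A's ""-sentinel well scan lets samples overwrite the control wells, an accidental
-- corner on nonsense input on which B places samples after the controls instead.
def Pre_pm_build_grid (sample_ids : List String) (replicate_count : Int) (layout_mode : String) (pos_label : String) (neg_label : String) (ctrl3_label : String) (include_pos : Bool) (include_neg : Bool) (include_ctrl3 : Bool) : Prop :=
  ¬ (layout_mode = "horizontal" ∧ 13 ≤ replicate_count ∧
      (include_pos = true ∨ include_neg = true ∨ include_ctrl3 = true)) ∧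
  ¬ (layout_mode = "vertical" ∧ 1 ≤ replicate_count ∧ sample_ids ≠ [] ∧
      ((include_pos = true ∧ pos_label = "") ∨ (include_neg = true ∧ neg_label = "") ∨
       (include_ctrl3 = true ∧ ctrl3_label = "")))
instance (sample_ids : List String) (replicate_count : Int) (layout_mode : String) (pos_label : String) (neg_label : String) (ctrl3_label : String) (include_pos : Bool) (include_neg : Bool) (include_ctrl3 : Bool) : Decidable (Pre_pm_build_grid sample_ids replicate_count layout_mode pos_label neg_label ctrl3_label include_pos include_neg include_ctrl3) := by unfold Pre_pm_build_grid; infer_instance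

def pvWitness_pm_build_grid : List String × Int × String × String × String × String × Bool × Bool × Bool :=
  (["S1", "S2"], 2, "vertical", "P", "N", "C", true, true, false)

def Spec_pm_build_grid (sample_ids : List String) (replicate_count : Int) (layout_mode : String) (pos_label : String) (neg_label : String) (ctrl3_label : String) (include_pos : Bool) (include_neg : Bool) (include_ctrl3 : Bool) (out : List (List String)) : Prop := out = pm_build_grid_alt sample_ids replicate_count layout_mode pos_label neg_label ctrl3_label include_pos include_neg include_ctrl3
instance (sample_ids : List String) (replicate_count : Int) (layout_mode : String) (pos_label : String) (neg_label : String) (ctrl3_label : String) (include_pos : Bool) (include_neg : Bool) (include_ctrl3 : Bool) (out : List (List String)) : Decidable (Spec_pm_build_grid sample_ids replicate_count layout_mode pos_label neg_label ctrl3_label include_pos include_neg include_ctrl3 out) := by unfold Spec_pm_build_grid; infer_instance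

-- ===== CLAIM (what is proved, stated in full; the proofs are below) =====
def Claim_equal_pm_build_grid : Prop := ∀ (sample_ids : List String) (replicate_count : Int) (layout_mode : String) (pos_label : String) (neg_label : String) (ctrl3_label : String) (include_pos : Bool) (include_neg : Bool) (include_ctrl3 : Bool), Dom_pm_build_grid sample_ids replicate_count layout_mode pos_label neg_label ctrl3_label include_pos include_neg include_ctrl3 → Pre_pm_build_grid sample_ids replicate_count layout_mode pos_label neg_label ctrl3_label include_pos include_neg include_ctrl3 → Spec_pm_build_grid sample_ids replicate_count layout_mode pos_label neg_label ctrl3_label include_pos include_neg include_ctrl3 (pm_build_grid sample_ids replicate_count layout_mode pos_label neg_label ctrl3_label include_pos include_neg include_ctrl3)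

-- ===== LEMMAS AND PROOFS =====

-- a plate is 8 rows of 12 wells
def pvGood (g : List (List String)) : Prop := g.length = 8 ∧ ∀ row ∈ g, row.length = 12

-- flat column-major write: well k ↦ (k % 8, k // 8), ignored past the 96 wells
def pmFlatPut (g : List (List String)) (k : Nat) (v : String) : List (List String) :=
  if k < 96 then pvSetCell g (k % 8) (k / 8) v else g

-- canonical flat sequential fill both ports are reduced to
def pmGenFill : List String → List (List String) → Nat → List (List String)
  | [], g, _ => g
  | v :: vs, g, k => pmGenFill vs (pmFlatPut g k v) (k + 1)

theorem pvGood_grid0 : pvGood pvGrid0 := ⟨rfl, by decide⟩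

theorem pvCell_grid0 {r c : Nat} (hr : r < 8) (hc : c < 12) : pvCell pvGrid0 r c = "" := by
  interval_cases r <;> interval_cases c <;> rfl

theorem pvGood_setCell {g : List (List String)} {r c : Nat} {v : String} (hg : pvGood g) :
    pvGood (pvSetCell g r c v) := by
  obtain ⟨h1, h2⟩ := hg
  unfold pvSetCell
  refine ⟨by simp [h1], ?_⟩
  intro row hrow
  obtain ⟨j, hj, hjr⟩ := List.mem_iff_getElem.1 hrow
  have hj' : j < g.length := by simpa using hj
  rw [List.getElem_modify] at hjr
  split at hjr
  · simp [← hjr, h2 g[j] (List.getElem_mem hj')]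
  · exact hjr ▸ h2 g[j] (List.getElem_mem hj')

theorem pvCell_setCell {g : List (List String)} (hg : pvGood g) {r0 c0 r c : Nat}
    (hr : r < 8) (hc : c < 12) (v : String) :
    pvCell (pvSetCell g r0 c0 v) r c = if r = r0 ∧ c = c0 then v else pvCell g r c := by
  obtain ⟨h1, h2⟩ := hg
  have hrl : r < g.length := by omega
  have hrow : g[r].length = 12 := h2 _ (List.getElem_mem hrl)
  unfold pvCell pvSetCell
  have hml : r < (g.modify r0 (fun row => row.set c0 v)).length := by simpa using hrl
  rw [List.getD_eq_getElem _ [] hml, List.getElem_modify, List.getD_eq_getElem _ [] hrl]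
  by_cases hrr : r0 = r
  · subst hrr
    rw [if_pos rfl, List.getD_eq_getElem _ "" (by simpa [hrow] using hc),
        List.getElem_set, List.getD_eq_getElem _ "" (by omega)]
    by_cases hcc : c0 = c
    · simp [hcc]
    · simp [hcc]
      exact fun h => absurd h.symm hcc
  · rw [if_neg hrr]
    have : ¬ (r = r0 ∧ c = c0) := fun h => hrr h.1.symm
    simp [this]

theorem pvGood_ext {g g' : List (List String)} (hg : pvGood g) (hg' : pvGood g')
    (h : ∀ r < 8, ∀ c < 12, pvCell g r c = pvCell g' r c) : g = g' := by
  apply List.ext_getElem (by rw [hg.1, hg'.1])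
  intro r hr hr'
  have hr8 : r < 8 := by have := hg.1; omega
  have hrow : g[r].length = 12 := hg.2 _ (List.getElem_mem hr)
  have hrow' : g'[r].length = 12 := hg'.2 _ (List.getElem_mem hr')
  apply List.ext_getElem (by rw [hrow, hrow'])
  intro c hc hc'
  have hc12 : c < 12 := by omega
  have := h r hr8 c hc12
  unfold pvCell at this
  rwa [List.getD_eq_getElem _ [] hr, List.getD_eq_getElem _ [] hr',
       List.getD_eq_getElem _ "" hc, List.getD_eq_getElem _ "" hc'] at this

theorem pmGenFill_ge96 (L : List String) (g : List (List String)) {k : Nat} (hk : 96 ≤ k) :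
    pmGenFill L g k = g := by
  induction L generalizing g k with
  | nil => rfl
  | cons v vs ih =>
    rw [pmGenFill, pmFlatPut, if_neg (by omega)]
    exact ih g (by omega)

theorem pmGenFill_good {L : List String} {g k} (hg : pvGood g) : pvGood (pmGenFill L g k) := by
  induction L generalizing g k with
  | nil => exact hg
  | cons v vs ih =>
    rw [pmGenFill]
    apply ih
    unfold pmFlatPut
    split
    · exact pvGood_setCell hg
    · exact hg

theorem pmGenFill_cell (L : List String) (g : List (List String)) (k0 : Nat) (hg : pvGood g)
    {r c : Nat} (hr : r < 8) (hc : c < 12) :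
    pvCell (pmGenFill L g k0) r c =
      if k0 ≤ c * 8 + r ∧ c * 8 + r < k0 + L.length then L.getD (c * 8 + r - k0) ""
      else pvCell g r c := by
  induction L generalizing g k0 with
  | nil => simp only [pmGenFill, List.length_nil, Nat.add_zero]; rw [if_neg (by omega)]
  | cons v vs ih =>
    rw [pmGenFill]
    by_cases h96 : k0 < 96
    · have hput : pmFlatPut g k0 v = pvSetCell g (k0 % 8) (k0 / 8) v := if_pos h96
      have hgood : pvGood (pmFlatPut g k0 v) := by rw [hput]; exact pvGood_setCell hg
      rw [ih _ _ hgood, hput, pvCell_setCell hg hr hc]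
      have hiff : (r = k0 % 8 ∧ c = k0 / 8) ↔ c * 8 + r = k0 := by omega
      by_cases heq : c * 8 + r = k0
      · have h1 : ¬ (k0 + 1 ≤ c * 8 + r ∧ c * 8 + r < k0 + 1 + vs.length) := by omega
        rw [if_neg h1, if_pos (hiff.2 heq), if_pos (by simp; omega)]
        simp [← heq]
      · rw [if_neg (fun h => heq (hiff.1 h))]
        by_cases h2 : k0 + 1 ≤ c * 8 + r ∧ c * 8 + r < k0 + 1 + vs.length
        · rw [if_pos h2, if_pos (by simp; omega)]
          obtain ⟨d, hd⟩ : ∃ d, c * 8 + r - k0 = d + 1 := ⟨c * 8 + r - k0 - 1, by omega⟩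
          rw [hd, List.getD_cons_succ]
          congr 1
          omega
        · rw [if_neg h2, if_neg (by simp; omega)]
    · rw [pmGenFill_ge96 vs _ (by omega)]
      unfold pmFlatPut
      rw [if_neg h96, if_neg (by simp; omega)]

theorem pmCtrlLoop_eq_genFill (ls : List String) (g : List (List String)) (crow ccol : Nat)
    (hrow : crow ≤ 8) (hcol : ccol < 12) :
    pmCtrlLoop ls g crow ccol = pmGenFill ls g (ccol * 8 + crow) := by
  induction ls generalizing g crow ccol with
  | nil => rfl
  | cons label rest ih =>
    rw [pmCtrlLoop, pmGenFill]
    by_cases h8 : crow ≥ 8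
    · have hcrow : crow = 8 := by omega
      rw [if_pos h8]
      by_cases h12 : ccol + 1 ≥ 12
      · rw [if_pos h12, pmGenFill_ge96 _ _ (by omega : 96 ≤ ccol * 8 + crow + 1)]
        unfold pmFlatPut
        rw [if_neg (by omega)]
      · rw [if_neg h12, ih _ 1 (ccol + 1) (by omega) (by omega)]
        have : pmFlatPut g (ccol * 8 + crow) label = pvSetCell g 0 (ccol + 1) label := by
          unfold pmFlatPut
          rw [if_pos (by omega)]
          congr 1 <;> omega
        rw [this, show (ccol + 1) * 8 + 1 = ccol * 8 + crow + 1 from by omega]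
    · rw [if_neg h8, ih _ (crow + 1) ccol (by omega) hcol]
      have : pmFlatPut g (ccol * 8 + crow) label = pvSetCell g crow ccol label := by
        unfold pmFlatPut
        rw [if_pos (by omega)]
        congr 1 <;> omega
      rw [this, show ccol * 8 + (crow + 1) = ccol * 8 + crow + 1 from by omega]

theorem pmPlace_aux (labels : List String) (g : List (List String)) (k0 : Nat)
    (h : k0 + labels.length ≤ 96) :
    (labels.zipIdx k0).foldl (fun g kl => pvSetCell g (kl.2 % 8) (kl.2 / 8) kl.1) g =
      pmGenFill labels g k0 := by
  induction labels generalizing g k0 with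
  | nil => rfl
  | cons v vs ih =>
    rw [List.zipIdx_cons, List.foldl_cons, pmGenFill, ih _ (k0 + 1) (by simp at h; omega)]
    congr 1
    unfold pmFlatPut
    rw [if_pos (by simp at h; omega)]

theorem pmPlaceLabels_eq_genFill (labels : List String) (g : List (List String))
    (h : labels.length ≤ 96) :
    pmPlaceLabels labels g = pmGenFill labels g 0 := by
  unfold pmPlaceLabels
  exact pmPlace_aux labels g 0 (by omega)

theorem pmFillLabels_spec (rep : Int) (sids : List String) (ls : List String)
    (h : ls.length ≤ 96) :
    pmFillLabels rep sids ls = (ls ++ sids.flatMap (List.replicate rep.toNat)).take 96 := by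
  induction sids generalizing ls with
  | nil => simp [pmFillLabels, List.take_of_length_le h]
  | cons sid rest ih =>
    rw [pmFillLabels]
    by_cases hfull : ls.length ≥ 96
    · have hl : ls.length = 96 := by omega
      rw [if_pos hfull, List.take_append, List.take_of_length_le (by omega), hl]
      simp
    · rw [if_neg hfull]
      set k : Nat := (min rep (96 - (ls.length : Int))).toNat with hk
      have hkle : k ≤ 96 - ls.length := by
        rw [hk]; omega
      rw [ih _ (by simp; omega)]
      rw [List.flatMap_cons, ← List.append_assoc]
      by_cases hcase : rep ≤ 96 - (ls.length : Int)
      · have hkn : k = rep.toNat := by rw [hk]; omega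
        rw [hkn]
      · have hka : k = 96 - ls.length := by rw [hk]; omega
        have hn : 96 - ls.length ≤ rep.toNat := by omega
        rw [List.append_assoc, List.append_assoc]
        simp only [List.take_append, List.take_replicate, List.length_replicate,
          List.take_of_length_le (by omega : ls.length ≤ 96)]
        have e1 : min (96 - ls.length) k = min (96 - ls.length) rep.toNat := by omega
        have e2 : 96 - ls.length - k = 96 - ls.length - rep.toNat := by omega
        rw [e1, e2]

def pmDropRange (m : Nat) : List (Nat × Nat) :=
  ((List.range 96).drop m).map (fun k => (k % 8, k / 8))

theorem pmFillPositions_spec (g : List (List String)) (m : Nat) (hm : m ≤ 96)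
    (hcell : ∀ r < 8, ∀ c < 12, (pvCell g r c = "" ↔ m ≤ c * 8 + r)) :
    pmFillPositions g = pmDropRange m := by
  unfold pmFillPositions
  simp only [PySem.List.foldl_append_if, PySem.List.foldl_append_eq_flatMap]
  rw [List.nil_append]
  have hcong : ∀ col ∈ List.range 12,
      (List.map (fun row => (row, col)) (List.filter (fun row => pvCell g row col == "") (List.range 8))) =
      (List.map (fun row => (row, col)) (List.filter (fun row => decide (m ≤ col * 8 + row)) (List.range 8))) := by
    intro col hcol
    congr 1
    apply List.filter_congr
    intro row hrow
    simp only [List.mem_range] at hcol hrow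
    have := hcell row hrow col hcol
    rw [Bool.eq_iff_iff]
    simp [this]
  rw [List.flatMap_congr hcong]
  have key : ∀ m < 97,
      (List.range 12).flatMap (fun col =>
        (List.map (fun row => (row, col)) (List.filter (fun row => decide (m ≤ col * 8 + row)) (List.range 8)))) =
      pmDropRange m := by
    unfold pmDropRange
    set_option maxRecDepth 4096 in decide
  exact key m (by omega)

def pmStep (fp : List (Nat × Nat)) (st : List (List String) × Nat) (v : String) :
    List (List String) × Nat :=
  if st.2 ≥ fp.length then st
  else ((pvSetCell st.1 (fp.getD st.2 (0, 0)).1 (fp.getD st.2 (0, 0)).2 v), st.2 + 1)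

theorem pmInnerFill_fixed (sid : String) (fp : List (Nat × Nat)) (n : Nat)
    (g : List (List String)) {idx : Nat} (h : idx ≥ fp.length) :
    pmInnerFill sid fp n (g, idx) = (g, idx) := by
  induction n with
  | zero => rfl
  | succ n _ => rw [pmInnerFill, if_pos h]

theorem pmInnerFill_eq_foldl (sid : String) (fp : List (Nat × Nat)) (n : Nat)
    (st : List (List String) × Nat) :
    pmInnerFill sid fp n st = (List.replicate n sid).foldl (pmStep fp) st := by
  induction n generalizing st with
  | zero => rfl
  | succ n ih =>
    obtain ⟨g, idx⟩ := st
    rw [List.replicate_succ, List.foldl_cons, ← ih, pmInnerFill]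
    unfold pmStep
    by_cases h : idx ≥ fp.length
    · rw [if_pos h, if_pos h, pmInnerFill_fixed sid fp n g h]
    · rw [if_neg h, if_neg h]

theorem pmSampleLoop_eq_foldl (sids : List String) (fp : List (Nat × Nat)) (n : Nat)
    (st : List (List String) × Nat) :
    sids.foldl (fun st sid => pmInnerFill sid fp n st) st =
      (sids.flatMap (List.replicate n)).foldl (pmStep fp) st := by
  induction sids generalizing st with
  | nil => rfl
  | cons sid rest ih =>
    rw [List.foldl_cons, List.flatMap_cons, List.foldl_append, pmInnerFill_eq_foldl, ih]

theorem pmDropRange_length (m : Nat) : (pmDropRange m).length = 96 - m := by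
  simp [pmDropRange]

theorem pmDropRange_getD (m idx : Nat) (h : idx < 96 - m) :
    (pmDropRange m).getD idx (0, 0) = ((m + idx) % 8, (m + idx) / 8) := by
  unfold pmDropRange
  rw [List.getD_eq_getElem _ _ (by simp; omega), List.getElem_map, List.getElem_drop,
      List.getElem_range]

theorem pmStep_fixed (fp : List (Nat × Nat)) (L : List String)
    (g : List (List String)) {idx : Nat} (h : idx ≥ fp.length) :
    L.foldl (pmStep fp) (g, idx) = (g, idx) := by
  induction L with
  | nil => rfl
  | cons v vs ih => rw [List.foldl_cons, pmStep, if_pos h]; exact ih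

theorem pmStepFold_eq_genFill (m : Nat) (hm : m ≤ 96) (L : List String)
    (g : List (List String)) (idx : Nat) :
    (L.foldl (pmStep (pmDropRange m)) (g, idx)).1 = pmGenFill L g (m + idx) := by
  induction L generalizing g idx with
  | nil => rfl
  | cons v vs ih =>
    rw [List.foldl_cons, pmGenFill]
    by_cases h : idx ≥ (pmDropRange m).length
    · rw [pmStep, if_pos h]
      rw [pmDropRange_length] at h
      rw [pmStep_fixed _ _ _ (by rw [pmDropRange_length]; omega),
          pmGenFill_ge96 _ _ (by omega : 96 ≤ m + idx + 1)]
      unfold pmFlatPut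
      rw [if_neg (by omega)]
    · rw [pmStep, if_neg h]
      rw [pmDropRange_length] at h
      simp only [pmDropRange_getD m idx (by omega)]
      rw [ih]
      have : pmFlatPut g (m + idx) v =
          pvSetCell g ((m + idx) % 8) ((m + idx) / 8) v := by
        unfold pmFlatPut; rw [if_pos (by omega)]
      rw [this, show m + (idx + 1) = m + idx + 1 from by omega]

theorem pmTake96 (l t : List String) : ((l.take 96) ++ t).take 96 = (l ++ t).take 96 := by
  simp only [List.take_append, List.take_take, List.length_take, Nat.min_self]
  congr 2
  omega

theorem pmAssembly (ctrl exp : List String) :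
    pmGenFill exp (pmGenFill ctrl pvGrid0 0) (min ctrl.length 96) =
      pmGenFill ((ctrl ++ exp).take 96) pvGrid0 0 := by
  set m := min ctrl.length 96 with hm
  have hg1 : pvGood (pmGenFill ctrl pvGrid0 0) := pmGenFill_good pvGood_grid0
  apply pvGood_ext (pmGenFill_good hg1) (pmGenFill_good pvGood_grid0)
  intro r hr c hc
  rw [pmGenFill_cell _ _ _ hg1 hr hc, pmGenFill_cell _ _ _ pvGood_grid0 hr hc,
      pmGenFill_cell _ _ _ pvGood_grid0 hr hc, pvCell_grid0 hr hc]
  simp only [Nat.zero_add, Nat.sub_zero, Nat.zero_le, true_and]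
  set rc := c * 8 + r with hrc
  have hrc96 : rc < 96 := by omega
  have hTlen : ((ctrl ++ exp).take 96).length = min (ctrl.length + exp.length) 96 := by
    simp [Nat.min_comm]
  have hTget : ∀ h : rc < ((ctrl ++ exp).take 96).length,
      ((ctrl ++ exp).take 96).getD rc "" = (ctrl ++ exp).getD rc "" := by
    intro h
    rw [List.getD_eq_getElem _ "" h, List.getElem_take,
        List.getD_eq_getElem _ "" (by simp at h ⊢; omega)]
  by_cases h1 : m ≤ rc ∧ rc < m + exp.length
  · rw [if_pos h1, if_pos (show rc < ((ctrl ++ exp).take 96).length by rw [hTlen]; omega),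
        hTget (by rw [hTlen]; omega)]
    have hclm : ctrl.length = m := by omega
    rw [List.getD_eq_getElem _ "" (by omega : rc - m < exp.length),
        List.getD_eq_getElem _ "" (by simp; omega),
        List.getElem_append_right (by omega : ctrl.length ≤ rc)]
    congr 1
    omega
  · rw [if_neg h1]
    by_cases h2 : rc < ctrl.length
    · rw [if_pos h2, if_pos (show rc < ((ctrl ++ exp).take 96).length by rw [hTlen]; omega),
          hTget (by rw [hTlen]; omega)]
      rw [List.getD_eq_getElem _ "" (by omega : rc < ctrl.length),
          List.getD_eq_getElem _ "" (by simp; omega),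
          List.getElem_append_left (by omega)]
    · rw [if_neg h2, if_neg (show ¬ rc < ((ctrl ++ exp).take 96).length by rw [hTlen]; omega)]

theorem pm_vertical (sids : List String) (rep : Int) (ctrl : List String)
    (hne : 1 ≤ rep → sids ≠ [] → ∀ s ∈ ctrl, s ≠ "") :
    (sids.foldl (fun st sid => pmInnerFill sid (pmFillPositions (pmCtrlLoop ctrl pvGrid0 0 0)) rep.toNat st)
      (pmCtrlLoop ctrl pvGrid0 0 0, 0)).1 =
    pmPlaceLabels (pmFillLabels rep sids (ctrl.take 96)) pvGrid0 := by
  set exp := List.flatMap (List.replicate rep.toNat) sids with hexpd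
  set m := min ctrl.length 96 with hmdef
  have hgC : pmCtrlLoop ctrl pvGrid0 0 0 = pmGenFill ctrl pvGrid0 0 := by
    simpa using pmCtrlLoop_eq_genFill ctrl pvGrid0 0 0 (by omega) (by omega)
  have hlb : pmFillLabels rep sids (ctrl.take 96) = (ctrl ++ exp).take 96 := by
    rw [pmFillLabels_spec _ _ _ (by simp), pmTake96]
  have hpl : pmPlaceLabels ((ctrl ++ exp).take 96) pvGrid0 =
      pmGenFill ((ctrl ++ exp).take 96) pvGrid0 0 :=
    pmPlaceLabels_eq_genFill _ _ (by simp)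
  rw [hlb, hpl, hgC, pmSampleLoop_eq_foldl]
  by_cases hdeg : 1 ≤ rep ∧ sids ≠ []
  · -- main case: characterise the empty wells after control placement
    have hiff : ∀ r < 8, ∀ c < 12,
        (pvCell (pmGenFill ctrl pvGrid0 0) r c = "" ↔ m ≤ c * 8 + r) := by
      intro r hr c hc
      rw [pmGenFill_cell _ _ _ pvGood_grid0 hr hc, pvCell_grid0 hr hc]
      simp only [Nat.zero_add, Nat.sub_zero, Nat.zero_le, true_and]
      by_cases hlt : c * 8 + r < ctrl.length
      · rw [if_pos hlt]
        have hmem : ctrl.getD (c * 8 + r) "" ∈ ctrl := by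
          rw [List.getD_eq_getElem _ "" hlt]
          exact List.getElem_mem hlt
        have := hne hdeg.1 hdeg.2 _ hmem
        constructor
        · intro h; exact absurd h this
        · intro h; omega
      · rw [if_neg hlt]
        simp only [true_iff]
        omega
    have hfp : pmFillPositions (pmGenFill ctrl pvGrid0 0) = pmDropRange m :=
      pmFillPositions_spec _ m (by omega) hiff
    rw [hfp, pmStepFold_eq_genFill m (by omega) exp _ 0, Nat.add_zero, pmAssembly]
  · -- degenerate: no samples are placed on either side
    have hexp0 : List.flatMap (List.replicate rep.toNat) sids = [] := by
      rcases not_and_or.1 hdeg with h | h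
      · have : rep.toNat = 0 := by omega
        simp [this]
      · simp [not_not.1 h]
    have hasm := pmAssembly ctrl []
    rw [pmGenFill, List.append_nil] at hasm
    rw [hexp0, show exp = [] from hexpd.trans hexp0, List.append_nil, List.foldl_nil, ← hasm]

theorem pm_build_grid_spec : Claim_equal_pm_build_grid := by
  unfold Claim_equal_pm_build_grid
  intro sids rep lm pl nl cl ip ine ic hdom hpre
  unfold Spec_pm_build_grid
  by_cases hv : lm = "vertical"
  · subst hv
    simp only [pm_build_grid, pm_build_grid_alt]
    apply pm_vertical
    intro hrep hsids s hs
    have hlab : ¬ ((ip = true ∧ pl = "") ∨ (ine = true ∧ nl = "") ∨ (ic = true ∧ cl = "")) :=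
      fun h => hpre.2 ⟨rfl, hrep, hsids, h⟩
    rcases List.mem_append.1 hs with hs | hs
    · rcases List.mem_append.1 hs with hs | hs
      · by_cases hip : ip = true
        · rw [if_pos hip] at hs
          rw [List.eq_of_mem_replicate hs]
          exact fun h => hlab (Or.inl ⟨hip, h⟩)
        · rw [if_neg hip] at hs; cases hs
      · by_cases hin : ine = true
        · rw [if_pos hin] at hs
          rw [List.eq_of_mem_replicate hs]
          exact fun h => hlab (Or.inr (Or.inl ⟨hin, h⟩))
        · rw [if_neg hin] at hs; cases hs
    · by_cases hic : ic = true
      · rw [if_pos hic] at hs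
        rw [List.eq_of_mem_replicate hs]
        exact fun h => hlab (Or.inr (Or.inr ⟨hic, h⟩))
      · rw [if_neg hic] at hs; cases hs
  · by_cases hh : lm = "horizontal"
    · subst hh
      simp only [pm_build_grid, pm_build_grid_alt, pmFillHorizontal, if_neg hv]
    · simp only [pm_build_grid, pm_build_grid_alt, if_neg hv, if_neg hh]
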